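-- pv_equiv track=rewrite | github.com/mayursd/carescore-additional-features | src/services/evaluation_service.py | checklist_counts
-- ===== SOURCE A (Python) =====
-- def checklist_counts(checklist: list[dict[str, str]]) -> dict[str, int]:
--     counts = {"Yes": 0, "No": 0, "Partial": 0}
--     for item in checklist or []:
--         status = str(item.get("Evaluated", "")).strip().title()
--         if status not in counts:
--             status = "No"
--         counts[status] += 1
--     return counts
-- ===== SOURCE B (Python) =====
-- def checklist_counts(checklist: list[dict[str, str]]) -> dict[str, int]:
--     statuses = [str(item.get("Evaluated", "")).strip().title() for item in (checklist or [])]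
--     yes = statuses.count("Yes")
--     partial = statuses.count("Partial")
--     return {"Yes": yes, "No": len(statuses) - yes - partial, "Partial": partial}
-- ===== Notes on version B (the rewrite author's own statement) =====
-- stated objective: simpler
-- what changed: Replaces A's dict-accumulator loop with a fallback branch by a single map to normalized statuses plus two list counts, deriving the No count by subtraction so unrecognized statuses fold into No arithmetically.
import Mathlib
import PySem

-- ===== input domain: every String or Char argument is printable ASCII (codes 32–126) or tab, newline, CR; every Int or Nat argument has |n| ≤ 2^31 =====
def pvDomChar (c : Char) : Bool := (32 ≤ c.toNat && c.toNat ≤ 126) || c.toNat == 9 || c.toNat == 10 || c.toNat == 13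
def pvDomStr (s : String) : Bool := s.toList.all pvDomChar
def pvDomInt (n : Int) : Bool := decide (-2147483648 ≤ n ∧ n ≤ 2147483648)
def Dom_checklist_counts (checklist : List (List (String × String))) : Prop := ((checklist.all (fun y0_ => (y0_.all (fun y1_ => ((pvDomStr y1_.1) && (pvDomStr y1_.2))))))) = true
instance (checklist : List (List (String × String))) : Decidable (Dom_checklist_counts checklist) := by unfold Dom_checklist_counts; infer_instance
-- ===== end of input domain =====

-- B replaces A's dict-accumulator loop with a map to normalized statuses plus two counts
-- (No derived by subtraction); objective: simpler. Return values proved equal; no mutation involved.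

-- shared normalization helper (both Pythons contain the identical expression
-- str(item.get("Evaluated","")).strip().title())
-- hand port of str.title(), exact on the ASCII domain: a letter is uppercased after a
-- non-letter (or at the start) and lowercased after a letter; other chars unchanged
def pyTitleChars : List Char → Bool → List Char
  | [], _ => []
  | c :: rest, prevAlpha =>
    if PySem.Chars.isalpha c then
      (if prevAlpha then PySem.Chars.lowerChar c else PySem.Chars.upperChar c) ::
        pyTitleChars rest true
    else c :: pyTitleChars rest false

def normStatus (item : List (String × String)) : String :=
  String.ofList (pyTitleChars (PySem.Str.strip ((PySem.Dict.mk item).getD "Evaluated" "")).toList false)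

-- ===== PORT A =====
def checklist_counts (checklist : List (List (String × String))) : List (String × Int) :=
  let counts : PySem.Dict String Int := PySem.Dict.ofList [("Yes", 0), ("No", 0), ("Partial", 0)]
  let counts := checklist.foldl (fun counts item =>
    let status := normStatus item
    let status := if counts.contains status then status else "No"
    counts.modify status 0 (· + 1)) counts
  counts.items

-- ===== PORT B =====
def checklist_counts_alt (checklist : List (List (String × String))) : List (String × Int) :=
  let statuses := checklist.map normStatus
  let yes : Int := PySem.List.count statuses "Yes"
  let part : Int := PySem.List.count statuses "Partial"
  [("Yes", yes), ("No", (statuses.length : Int) - yes - part), ("Partial", part)]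

-- ===== PRECONDITION & SPEC =====
def Spec_checklist_counts (checklist : List (List (String × String))) (out : List (String × Int)) : Prop := out = checklist_counts_alt checklist
instance (checklist : List (List (String × String))) (out : List (String × Int)) : Decidable (Spec_checklist_counts checklist out) := by unfold Spec_checklist_counts; infer_instance

-- ===== CLAIM (what is proved, stated in full; the proofs are below) =====
def Claim_equal_checklist_counts : Prop := ∀ (checklist : List (List (String × String))), Dom_checklist_counts checklist → Spec_checklist_counts checklist (checklist_counts checklist)

-- ===== LEMMAS AND PROOFS =====

-- the loop body of A with the accumulator in its invariant shape
lemma checklist_counts_fold (l : List (List (String × String))) :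
    ∀ (a b c : Int),
      l.foldl (fun counts item =>
        let status := normStatus item
        let status := if counts.contains status then status else "No"
        counts.modify status 0 (· + 1))
        (PySem.Dict.mk [("Yes", a), ("No", b), ("Partial", c)]) =
      PySem.Dict.mk [("Yes", a + ((l.map normStatus).count "Yes" : Int)),
        ("No", b + ((l.length : Int) - ((l.map normStatus).count "Yes" : Int)
                    - ((l.map normStatus).count "Partial" : Int))),
        ("Partial", c + ((l.map normStatus).count "Partial" : Int))] := by
  induction l with
  | nil => intro a b c; simp
  | cons x xs ih =>
    intro a b c
    have hstep :
        (let status := normStatus x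
         let status := if (PySem.Dict.mk [("Yes", a), ("No", b), ("Partial", c)]).contains status
                       then status else "No"
         (PySem.Dict.mk [("Yes", a), ("No", b), ("Partial", c)]).modify status 0 (· + 1)) =
        if normStatus x = "Yes" then PySem.Dict.mk [("Yes", a + 1), ("No", b), ("Partial", c)]
        else if normStatus x = "Partial" then PySem.Dict.mk [("Yes", a), ("No", b), ("Partial", c + 1)]
        else PySem.Dict.mk [("Yes", a), ("No", b + 1), ("Partial", c)] := by
      by_cases hy : normStatus x = "Yes"
      · simp [hy, PySem.Dict.contains, PySem.Dict.modify, PySem.Dict.insert,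
          PySem.Dict.getD, PySem.Dict.get?]
      · by_cases hp : normStatus x = "Partial"
        · simp [hp, PySem.Dict.contains, PySem.Dict.modify, PySem.Dict.insert,
            PySem.Dict.getD, PySem.Dict.get?]
        · have hy' : ("Yes" : String) ≠ normStatus x := fun h => hy h.symm
          have hp' : ("Partial" : String) ≠ normStatus x := fun h => hp h.symm
          by_cases hn : normStatus x = "No"
          · simp [hy, hp, hn, hy', hp', PySem.Dict.contains, PySem.Dict.modify,
              PySem.Dict.insert, PySem.Dict.getD, PySem.Dict.get?]
          · have hn' : ("No" : String) ≠ normStatus x := fun h => hn h.symm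
            simp [hy, hp, hn, hy', hp', hn', PySem.Dict.contains, PySem.Dict.modify,
              PySem.Dict.insert, PySem.Dict.getD, PySem.Dict.get?]
    rw [List.foldl_cons, hstep]
    by_cases hy : normStatus x = "Yes"
    · rw [if_pos hy, ih]
      apply congrArg PySem.Dict.mk
      simp [hy]
      omega
    · by_cases hp : normStatus x = "Partial"
      · rw [if_neg hy, if_pos hp, ih]
        apply congrArg PySem.Dict.mk
        simp [hp]
        omega
      · rw [if_neg hy, if_neg hp, ih]
        apply congrArg PySem.Dict.mk
        simp [hy, hp]
        omega

-- ===== VERDICT (by name: the statement is the Claim_ definition above) =====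
theorem checklist_counts_spec : Claim_equal_checklist_counts := by
  intro checklist _
  unfold Spec_checklist_counts checklist_counts checklist_counts_alt
  have h0 : (PySem.Dict.ofList [(("Yes" : String), (0 : Int)), ("No", 0), ("Partial", 0)])
      = PySem.Dict.mk [("Yes", 0), ("No", 0), ("Partial", 0)] := by decide
  simp only [h0, checklist_counts_fold, PySem.List.count_eq,
    List.length_map]
  norm_num
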